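-- pv_equiv track=rewrite | github.com/prussiadev/The-Price-For-Peace | python_scripts/remove_date_blocks.py | remove_date_blocks
-- ===== SOURCE A (Python) =====
-- def remove_date_blocks(text):
--     result = []
--     i = 0
--     length = len(text)
--
--     while i < length:
--         # Look for start of a date block: YYYY.M.D = {
--         if (
--             i + 10 < length
--             and text[i].isdigit()
--             and text[i:i+4].isdigit()
--             and text[i+4] == '.'
--         ):
--             # Try to parse the full date pattern
--             j = i
--             while j < length and (text[j].isdigit() or text[j] == '.'):
--                 j += 1
--
--             # Skip whitespace
--             k = j
--             while k < length and text[k].isspace():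
--                 k += 1
--
--             # Check for "= {"
--             if k + 1 < length and text[k] == '=':
--                 k += 1
--                 while k < length and text[k].isspace():
--                     k += 1
--
--                 if k < length and text[k] == '{':
--                     # Found start of date block
--                     brace_depth = 1
--                     k += 1
--
--                     while k < length and brace_depth > 0:
--                         if text[k] == '{':
--                             brace_depth += 1
--                         elif text[k] == '}':
--                             brace_depth -= 1
--                         k += 1
--
--                     # Skip everything in this block
--                     i = k
--                     continue
--
--         # Normal character, keep it
--         result.append(text[i])
--         i += 1
--
--     return ''.join(result)
-- ===== SOURCE B (Python) =====
-- def remove_date_blocks(text):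
--     n = len(text)
--     out = []
--     i = 0
--     while i < n:
--         c = text[i]
--         if not c.isdigit():
--             out.append(c)
--             i += 1
--             continue
--         # Extend the whole digit/dot run once.
--         j = i
--         while j < n and (text[j].isdigit() or text[j] == '.'):
--             j += 1
--         # Is the run followed by "= {" (with whitespace)?
--         brace = -1
--         k = j
--         while k < n and text[k].isspace():
--             k += 1
--         if k + 1 < n and text[k] == '=':
--             k += 1
--             while k < n and text[k].isspace():
--                 k += 1
--             if k < n and text[k] == '{':
--                 brace = k
--         # Earliest position inside the run where a date pattern can start.
--         start = -1
--         if brace != -1: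
--             for p in range(i, j):
--                 if p + 10 < n and text[p:p+4].isdigit() and text[p+4] == '.':
--                     start = p
--                     break
--         if start == -1:
--             # No removable block here: emit the whole run, never rescan it.
--             out.append(text[i:j])
--             i = j
--         else:
--             out.append(text[i:start])
--             depth = 1
--             k = brace + 1
--             while k < n and depth > 0:
--                 if text[k] == '{':
--                     depth += 1
--                 elif text[k] == '}':
--                     depth -= 1
--                 k += 1
--             i = k
--     return ''.join(out)
-- ===== Notes on version B (the rewrite author's own statement) =====
-- stated objective: faster
-- what changed: B processes each digit/dot run once (computes the run extent and the '= {' suffix check a single time, then either skips past the removed block or emits the whole failed run and jumps to its end), instead of A's per-character restart that rescans the run from every position inside it.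
import Mathlib
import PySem

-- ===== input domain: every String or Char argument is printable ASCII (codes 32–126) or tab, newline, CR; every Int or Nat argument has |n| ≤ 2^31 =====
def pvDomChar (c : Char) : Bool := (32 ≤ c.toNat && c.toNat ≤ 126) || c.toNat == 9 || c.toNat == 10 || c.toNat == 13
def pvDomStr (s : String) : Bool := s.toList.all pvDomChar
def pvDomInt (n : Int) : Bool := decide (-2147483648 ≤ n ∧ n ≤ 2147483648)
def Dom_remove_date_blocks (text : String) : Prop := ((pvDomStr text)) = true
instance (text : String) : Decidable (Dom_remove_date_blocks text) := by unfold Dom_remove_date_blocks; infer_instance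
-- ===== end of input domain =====

-- B is a single pass: it scans each digit/dot run once, checks "= {" once per run and
-- skips the whole failed run, instead of A's per-character rescans (quadratic worst case).

-- text[q] (all accesses in both Pythons are guarded by q < len(text), so getD is exact)
def pvGet (cs : List Char) (q : Nat) : Char := cs.getD q ' '

-- `while j < length and (text[j].isdigit() or text[j] == '.')` (both Pythons have this loop)
def pvRunEnd (cs : List Char) (n j : Nat) : Nat :=
  if h : j < n then
    if PySem.Chars.isdigit (pvGet cs j) || pvGet cs j == '.' then pvRunEnd cs n (j + 1) else j
  else j
termination_by n - j
decreasing_by exact Nat.sub_succ_lt_self n j h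

-- `while k < length and text[k].isspace()` (both Pythons)
def pvWsEnd (cs : List Char) (n k : Nat) : Nat :=
  if h : k < n then
    if PySem.Chars.isspace (pvGet cs k) then pvWsEnd cs n (k + 1) else k
  else k
termination_by n - k
decreasing_by exact Nat.sub_succ_lt_self n k h

-- the balanced-brace skip loop (both Pythons)
def pvBraceEnd (cs : List Char) (n k depth : Nat) : Nat :=
  if h : k < n then
    if depth > 0 then
      pvBraceEnd cs n (k + 1)
        (if pvGet cs k == '{' then depth + 1
         else if pvGet cs k == '}' then depth - 1 else depth)
    else k
  else k
termination_by n - k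
decreasing_by exact Nat.sub_succ_lt_self n k h

theorem pvRunEnd_ge (cs : List Char) (n j : Nat) : j ≤ pvRunEnd cs n j := by
  fun_induction pvRunEnd cs n j <;> omega

theorem pvWsEnd_ge (cs : List Char) (n k : Nat) : k ≤ pvWsEnd cs n k := by
  fun_induction pvWsEnd cs n k <;> omega

theorem pvBraceEnd_ge (cs : List Char) (n k depth : Nat) : k ≤ pvBraceEnd cs n k depth := by
  fun_induction pvBraceEnd cs n k depth
  all_goals try simp only [dite_eq_ite] at *
  all_goals omega

theorem pvDecBrace (cs : List Char) (n i : Nat) (hi : i < n) :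
    n - pvBraceEnd cs n (pvWsEnd cs n (pvWsEnd cs n (pvRunEnd cs n i) + 1) + 1) 1 < n - i := by
  have h1 := pvRunEnd_ge cs n i
  have h2 := pvWsEnd_ge cs n (pvRunEnd cs n i)
  have h3 := pvWsEnd_ge cs n (pvWsEnd cs n (pvRunEnd cs n i) + 1)
  have h4 := pvBraceEnd_ge cs n (pvWsEnd cs n (pvWsEnd cs n (pvRunEnd cs n i) + 1) + 1) 1
  omega

-- ===== PORT A =====
-- A's start test: `i+10 < length and text[i].isdigit() and text[i:i+4].isdigit() and text[i+4]=='.'`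
-- (the slice text[i:i+4] is (cs.drop i).take 4, exact here since the i+10 < n guard runs first)
def pvACond (cs : List Char) (n i : Nat) : Bool :=
  decide (i + 10 < n) && PySem.Chars.isdigit (pvGet cs i)
    && ((cs.drop i).take 4).all PySem.Chars.isdigit && (pvGet cs (i + 4) == '.')

def pvALoop (cs : List Char) (n i : Nat) : List Char :=
  if hi : i < n then
    if pvACond cs n i then
      let j := pvRunEnd cs n i
      let k := pvWsEnd cs n j
      if decide (k + 1 < n) && (pvGet cs k == '=') then
        let k2 := pvWsEnd cs n (k + 1)
        if decide (k2 < n) && (pvGet cs k2 == '{') then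
          pvALoop cs n (pvBraceEnd cs n (k2 + 1) 1)
        else pvGet cs i :: pvALoop cs n (i + 1)
      else pvGet cs i :: pvALoop cs n (i + 1)
    else pvGet cs i :: pvALoop cs n (i + 1)
  else []
termination_by n - i
decreasing_by
  · exact pvDecBrace cs n i hi
  all_goals exact Nat.sub_succ_lt_self n i hi

def remove_date_blocks (text : String) : String :=
  String.ofList (pvALoop text.toList text.toList.length 0)

-- ===== PORT B =====
-- B's candidate test inside a run: `p+10 < n and text[p:p+4].isdigit() and text[p+4]=='.'`
def pvBCond (cs : List Char) (n p : Nat) : Bool :=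
  decide (p + 10 < n) && ((cs.drop p).take 4).all PySem.Chars.isdigit && (pvGet cs (p + 4) == '.')

-- B's `for p in range(i, j): if <cond>: start = p; break`
def pvFindStart (cs : List Char) (n p j : Nat) : Option Nat :=
  if h : p < j then
    if pvBCond cs n p then some p else pvFindStart cs n (p + 1) j
  else none
termination_by j - p
decreasing_by exact Nat.sub_succ_lt_self j p h

theorem pvRunEnd_gt (cs : List Char) (n i : Nat) (hi : i < n)
    (hd : PySem.Chars.isdigit (pvGet cs i) = true) : i < pvRunEnd cs n i := by
  rw [pvRunEnd]
  simp only [dif_pos hi, hd, Bool.true_or, if_pos]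
  have := pvRunEnd_ge cs n (i + 1)
  omega

theorem pvDecRun (cs : List Char) (n i : Nat) (hi : i < n)
    (hd : PySem.Chars.isdigit (pvGet cs i) = true) : n - pvRunEnd cs n i < n - i :=
  Nat.sub_lt_sub_left hi (pvRunEnd_gt cs n i hi hd)

def pvBLoop (cs : List Char) (n i : Nat) : List Char :=
  if hi : i < n then
    if hd : PySem.Chars.isdigit (pvGet cs i) then
      let j := pvRunEnd cs n i
      let k := pvWsEnd cs n j
      if decide (k + 1 < n) && (pvGet cs k == '=') then
        let k2 := pvWsEnd cs n (k + 1)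
        if decide (k2 < n) && (pvGet cs k2 == '{') then
          match pvFindStart cs n i j with
          | some s => (cs.drop i).take (s - i) ++ pvBLoop cs n (pvBraceEnd cs n (k2 + 1) 1)
          | none => (cs.drop i).take (j - i) ++ pvBLoop cs n j
        else (cs.drop i).take (j - i) ++ pvBLoop cs n j
      else (cs.drop i).take (j - i) ++ pvBLoop cs n j
    else pvGet cs i :: pvBLoop cs n (i + 1)
  else []
termination_by n - i
decreasing_by
  · exact pvDecBrace cs n i hi
  · exact pvDecRun cs n i hi hd
  · exact pvDecRun cs n i hi hd
  · exact pvDecRun cs n i hi hd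
  · exact Nat.sub_succ_lt_self n i hi

def remove_date_blocks_alt (text : String) : String :=
  String.ofList (pvBLoop text.toList text.toList.length 0)

-- ===== PRECONDITION & SPEC =====
def Spec_remove_date_blocks (text : String) (out : String) : Prop := out = remove_date_blocks_alt text
instance (text : String) (out : String) : Decidable (Spec_remove_date_blocks text out) := by unfold Spec_remove_date_blocks; infer_instance

-- ===== CLAIM (what is proved, stated in full; the proofs are below) =====
def Claim_equal_remove_date_blocks : Prop := ∀ (text : String), Dom_remove_date_blocks text → Spec_remove_date_blocks text (remove_date_blocks text)

-- ===== LEMMAS AND PROOFS =====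

theorem pvRunEnd_le (cs : List Char) (n j : Nat) (h : j ≤ n) : pvRunEnd cs n j ≤ n := by
  fun_induction pvRunEnd cs n j <;> omega

-- every position strictly inside a run is a digit/dot position
theorem pvRun_mem (cs : List Char) (n j : Nat) :
    ∀ p, j ≤ p → p < pvRunEnd cs n j →
      p < n ∧ (PySem.Chars.isdigit (pvGet cs p) || pvGet cs p == '.') = true := by
  fun_induction pvRunEnd cs n j with
  | case1 j h hd ih =>
    intro p hp1 hp2
    rcases Nat.eq_or_lt_of_le hp1 with rfl | hlt
    · exact ⟨h, hd⟩
    · exact ih p hlt hp2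
  | case2 => omega
  | case3 => omega

-- the run end is the same from any position inside the run
theorem pvRunEnd_between (cs : List Char) (n j : Nat) :
    ∀ p, j ≤ p → p ≤ pvRunEnd cs n j → pvRunEnd cs n p = pvRunEnd cs n j := by
  fun_induction pvRunEnd cs n j with
  | case1 j h hd ih =>
    intro p hp1 hp2
    rcases Nat.eq_or_lt_of_le hp1 with rfl | hlt
    · rw [pvRunEnd, dif_pos h, if_pos hd]
    · exact ih p hlt hp2
  | case2 j h hd =>
    intro p hp1 hp2
    have : p = j := by omega
    subst this
    rw [pvRunEnd, dif_pos h, if_neg hd]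
  | case3 j h =>
    intro p hp1 hp2
    have : p = j := by omega
    subst this
    rw [pvRunEnd, dif_neg h]

theorem pvSlice_cons (cs : List Char) (p e : Nat) (hp : p < cs.length) (hpe : p < e) :
    (cs.drop p).take (e - p) = pvGet cs p :: (cs.drop (p + 1)).take (e - (p + 1)) := by
  rw [List.drop_eq_getElem_cons hp]
  have : e - p = (e - (p + 1)) + 1 := by omega
  rw [this, List.take_succ_cons]
  simp [pvGet, List.getD_eq_getElem?_getD, List.getElem?_eq_getElem hp]

-- if A appends one character at every position of [p, e), it emits the slice text[p:e]
theorem pvALoop_emit (cs : List Char) (n : Nat) (e : Nat) (he : e ≤ cs.length) :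
    ∀ d p, e = p + d →
    (∀ q, p ≤ q → q < e → pvALoop cs n q = pvGet cs q :: pvALoop cs n (q + 1)) →
    pvALoop cs n p = (cs.drop p).take (e - p) ++ pvALoop cs n e := by
  intro d
  induction d with
  | zero =>
    intro p hpe _
    simp [hpe]
  | succ d ih =>
    intro p hpe hstep
    have hpl : p < cs.length := by omega
    have hpe' : p < e := by omega
    rw [pvSlice_cons cs p e hpl hpe', hstep p (le_refl p) hpe',
        ih (p + 1) (by omega) (fun q h1 h2 => hstep q (by omega) h2)]
    simp

theorem pvACond_imp_pvBCond (cs : List Char) (n q : Nat) (h : pvACond cs n q = true) :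
    pvBCond cs n q = true := by
  simp only [pvACond, Bool.and_eq_true] at h
  simp only [pvBCond, Bool.and_eq_true]
  exact ⟨⟨h.1.1.1, h.1.2⟩, h.2⟩

theorem pvBCond_head_digit (cs : List Char) (n q : Nat) (hn : n = cs.length)
    (h : pvBCond cs n q = true) : PySem.Chars.isdigit (pvGet cs q) = true := by
  simp only [pvBCond, Bool.and_eq_true, decide_eq_true_eq] at h
  have hq : q < cs.length := by omega
  have hdr : cs.drop q = cs[q] :: cs.drop (q + 1) := List.drop_eq_getElem_cons hq
  have hall := h.1.2
  rw [hdr, List.take_succ_cons, List.all_cons, Bool.and_eq_true] at hall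
  have : pvGet cs q = cs[q] := by
    simp [pvGet, List.getD_eq_getElem?_getD, List.getElem?_eq_getElem hq]
  rw [this]; exact hall.1

theorem pvBCond_imp_pvACond (cs : List Char) (n q : Nat) (hn : n = cs.length)
    (h : pvBCond cs n q = true) : pvACond cs n q = true := by
  simp only [pvBCond, Bool.and_eq_true] at h
  simp only [pvACond, Bool.and_eq_true]
  exact ⟨⟨⟨h.1.1, pvBCond_head_digit cs n q hn (by simp [pvBCond, h.1.1, h.1.2, h.2])⟩, h.1.2⟩, h.2⟩

theorem pvFindStart_none (cs : List Char) (n p j : Nat) (h : pvFindStart cs n p j = none) :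
    ∀ q, p ≤ q → q < j → pvBCond cs n q = false := by
  fun_induction pvFindStart cs n p j with
  | case1 => simp_all
  | case2 p hpj hc ih =>
    intro q h1 h2
    rcases Nat.eq_or_lt_of_le h1 with rfl | hlt
    · simpa using hc
    · exact ih h q hlt h2
  | case3 => omega

theorem pvFindStart_some (cs : List Char) (n p j s : Nat) (h : pvFindStart cs n p j = some s) :
    p ≤ s ∧ s < j ∧ pvBCond cs n s = true ∧ ∀ q, p ≤ q → q < s → pvBCond cs n q = false := by
  fun_induction pvFindStart cs n p j with
  | case1 p hpj hc =>
    simp only [Option.some.injEq] at h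
    subst h
    exact ⟨le_refl _, hpj, hc, fun q h1 h2 => by omega⟩
  | case2 p hpj hc ih =>
    obtain ⟨a1, a2, a3, a4⟩ := ih h
    refine ⟨by omega, a2, a3, fun q h1 h2 => ?_⟩
    rcases Nat.eq_or_lt_of_le h1 with rfl | hlt
    · simpa using hc
    · exact a4 q hlt h2
  | case3 => simp_all

-- A appends text[q] when the start test fails at q
theorem pvALoop_append_nocond (cs : List Char) (n q : Nat) (hq : q < n)
    (hc : pvACond cs n q = false) :
    pvALoop cs n q = pvGet cs q :: pvALoop cs n (q + 1) := by
  rw [pvALoop, dif_pos hq, if_neg (by simp [hc])]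

-- A appends text[q] when the start test succeeds but the run (ending at j) is not followed by "= {"
theorem pvALoop_append_fail (cs : List Char) (n q j : Nat) (hq : q < n)
    (hrun : pvRunEnd cs n q = j)
    (hfail : (decide (pvWsEnd cs n j + 1 < n) && (pvGet cs (pvWsEnd cs n j) == '=')) = false
           ∨ (decide (pvWsEnd cs n (pvWsEnd cs n j + 1) < n) && (pvGet cs (pvWsEnd cs n (pvWsEnd cs n j + 1)) == '{')) = false) :
    pvALoop cs n q = pvGet cs q :: pvALoop cs n (q + 1) := by
  rw [pvALoop, dif_pos hq]
  by_cases hc : pvACond cs n q = true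
  · rw [if_pos hc]
    simp only [hrun]
    rcases hfail with hf | hf
    · rw [if_neg (by simp [hf])]
    · by_cases hA : (decide (pvWsEnd cs n j + 1 < n) && (pvGet cs (pvWsEnd cs n j) == '=')) = true
      · rw [if_pos hA, if_neg (by simp [hf])]
      · rw [if_neg hA]
  · rw [if_neg hc]

-- A skips the whole block when the start test succeeds at s and "= {" follows the run
theorem pvALoop_block (cs : List Char) (n s j : Nat) (hs : s < n)
    (hc : pvACond cs n s = true) (hrun : pvRunEnd cs n s = j)
    (hA : (decide (pvWsEnd cs n j + 1 < n) && (pvGet cs (pvWsEnd cs n j) == '=')) = true)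
    (hB : (decide (pvWsEnd cs n (pvWsEnd cs n j + 1) < n) && (pvGet cs (pvWsEnd cs n (pvWsEnd cs n j + 1)) == '{')) = true) :
    pvALoop cs n s = pvALoop cs n (pvBraceEnd cs n (pvWsEnd cs n (pvWsEnd cs n j + 1) + 1) 1) := by
  rw [pvALoop, dif_pos hs, if_pos hc]
  simp only [hrun]
  rw [if_pos hA, if_pos hB]

-- ===== main equivalence =====
theorem pv_main (cs : List Char) (n : Nat) (hn : n = cs.length) :
    ∀ m i, n - i ≤ m → pvALoop cs n i = pvBLoop cs n i := by
  intro m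
  induction m with
  | zero =>
    intro i h
    have hi : ¬ i < n := by omega
    rw [pvALoop, dif_neg hi, pvBLoop, dif_neg hi]
  | succ m ih =>
    intro i hm
    by_cases hi : i < n
    · by_cases hd : PySem.Chars.isdigit (pvGet cs i) = true
      · -- digit at i: both sides handle the whole digit/dot run [i, j)
        have hij : i < pvRunEnd cs n i := pvRunEnd_gt cs n i hi hd
        have hjn : pvRunEnd cs n i ≤ n := pvRunEnd_le cs n i (by omega)
        have hkj := pvWsEnd_ge cs n (pvRunEnd cs n i)
        have hk2 := pvWsEnd_ge cs n (pvWsEnd cs n (pvRunEnd cs n i) + 1)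
        have hbr := pvBraceEnd_ge cs n (pvWsEnd cs n (pvWsEnd cs n (pvRunEnd cs n i) + 1) + 1) 1
        by_cases hA : (decide (pvWsEnd cs n (pvRunEnd cs n i) + 1 < n) && (pvGet cs (pvWsEnd cs n (pvRunEnd cs n i)) == '=')) = true
        · by_cases hB : (decide (pvWsEnd cs n (pvWsEnd cs n (pvRunEnd cs n i) + 1) < n) && (pvGet cs (pvWsEnd cs n (pvWsEnd cs n (pvRunEnd cs n i) + 1)) == '{')) = true
          · -- "= {" follows the run
            cases hfs : pvFindStart cs n i (pvRunEnd cs n i) with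
            | none =>
              -- no valid date start inside the run: A appends every run character
              have hbc := pvFindStart_none cs n i (pvRunEnd cs n i) hfs
              have hemit := pvALoop_emit cs n (pvRunEnd cs n i) (by omega) (pvRunEnd cs n i - i) i (by omega)
                (fun q h1 h2 => pvALoop_append_nocond cs n q (pvRun_mem cs n i q h1 h2).1
                  (by cases hac : pvACond cs n q with
                      | false => rfl
                      | true => exact absurd (pvACond_imp_pvBCond cs n q hac) (by simp [hbc q h1 h2])))
              rw [hemit]
              conv_rhs => rw [pvBLoop, dif_pos hi, dif_pos hd]
              simp only [if_pos hA, if_pos hB, hfs]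
              rw [ih (pvRunEnd cs n i) (by omega)]
            | some s =>
              -- a block starts at s: A appends [i, s) char by char, then skips the block
              obtain ⟨his, hsj, hbs, hmin⟩ := pvFindStart_some cs n i (pvRunEnd cs n i) s hfs
              have hacs : pvACond cs n s = true := pvBCond_imp_pvACond cs n s hn hbs
              have hruns : pvRunEnd cs n s = pvRunEnd cs n i :=
                pvRunEnd_between cs n i s his (by omega)
              have hemit := pvALoop_emit cs n s (by omega) (s - i) i (by omega)
                (fun q h1 h2 => pvALoop_append_nocond cs n q (pvRun_mem cs n i q h1 (by omega)).1
                  (by cases hac : pvACond cs n q with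
                      | false => rfl
                      | true => exact absurd (pvACond_imp_pvBCond cs n q hac) (by simp [hmin q h1 h2])))
              rw [hemit, pvALoop_block cs n s (pvRunEnd cs n i) (by omega) hacs hruns hA hB]
              conv_rhs => rw [pvBLoop, dif_pos hi, dif_pos hd]
              simp only [if_pos hA, if_pos hB, hfs]
              rw [ih (pvBraceEnd cs n (pvWsEnd cs n (pvWsEnd cs n (pvRunEnd cs n i) + 1) + 1) 1) (by omega)]
          · -- '=' found but no '{': A appends every run character
            have hemit := pvALoop_emit cs n (pvRunEnd cs n i) (by omega) (pvRunEnd cs n i - i) i (by omega)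
              (fun q h1 h2 => pvALoop_append_fail cs n q (pvRunEnd cs n i) (pvRun_mem cs n i q h1 h2).1
                (pvRunEnd_between cs n i q h1 (by omega)) (Or.inr (by simpa using hB)))
            rw [hemit]
            conv_rhs => rw [pvBLoop, dif_pos hi, dif_pos hd]
            simp only [if_pos hA, if_neg hB]
            rw [ih (pvRunEnd cs n i) (by omega)]
        · -- no '=' after the run: A appends every run character
          have hemit := pvALoop_emit cs n (pvRunEnd cs n i) (by omega) (pvRunEnd cs n i - i) i (by omega)
            (fun q h1 h2 => pvALoop_append_fail cs n q (pvRunEnd cs n i) (pvRun_mem cs n i q h1 h2).1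
              (pvRunEnd_between cs n i q h1 (by omega)) (Or.inl (by simpa using hA)))
          rw [hemit]
          conv_rhs => rw [pvBLoop, dif_pos hi, dif_pos hd]
          simp only [if_neg hA]
          rw [ih (pvRunEnd cs n i) (by omega)]
      · -- non-digit: both append text[i]
        have hd' : PySem.Chars.isdigit (pvGet cs i) = false := by simpa using hd
        have hc : pvACond cs n i = false := by simp [pvACond, hd']
        rw [pvALoop_append_nocond cs n i hi hc, pvBLoop, dif_pos hi, dif_neg hd,
            ih (i + 1) (by omega)]
    · rw [pvALoop, dif_neg hi, pvBLoop, dif_neg hi]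

theorem remove_date_blocks_spec : Claim_equal_remove_date_blocks := by
  intro text _
  unfold Spec_remove_date_blocks remove_date_blocks remove_date_blocks_alt
  rw [pv_main text.toList text.toList.length rfl (text.toList.length) 0 (by omega)]
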